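-- pv_equiv track=rewrite | github.com/AtonedWallflower/namaste-india-rag | phase1_scraping/backup_scraper.py | classify_theme
-- ===== SOURCE A (Python) =====
-- def classify_theme(text):
--     """Classify tour theme based on text"""
--     text_lower = text.lower()
--     if any(word in text_lower for word in ['pilgrim', 'yatra', 'dham', 'temple']):
--         return 'Pilgrimage'
--     elif any(word in text_lower for word in ['heritage', 'rajasthan', 'palace']):
--         return 'Heritage'
--     elif any(word in text_lower for word in ['wildlife', 'safari']):
--         return 'Wildlife'
--     elif any(word in text_lower for word in ['yoga', 'meditation']):
--         return 'Wellness'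
--     elif any(word in text_lower for word in ['honeymoon', 'romantic']):
--         return 'Romantic'
--     elif any(word in text_lower for word in ['beach', 'island']):
--         return 'Beach'
--     elif any(word in text_lower for word in ['adventure', 'trek']):
--         return 'Adventure'
--     elif any(word in text_lower for word in ['buddhist', 'circuit']):
--         return 'Spiritual'
--     elif any(word in text_lower for word in ['helicopter']):
--         return 'Helicopter Tours'
--     elif any(word in text_lower for word in ['group']):
--         return 'Group Tours'
--     elif any(word in text_lower for word in ['international', 'vietnam', 'thailand']):
--         return 'International'
--     else:
--         return 'General'
-- ===== SOURCE B (Python) =====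
-- # Flat keyword->rank map, scanned exhaustively while keeping a running minimum
-- # theme rank; the answer is the theme with the smallest rank whose keyword occurs.
-- KEYWORD_RANK = {
--     'pilgrim': 0, 'yatra': 0, 'dham': 0, 'temple': 0,
--     'heritage': 1, 'rajasthan': 1, 'palace': 1,
--     'wildlife': 2, 'safari': 2,
--     'yoga': 3, 'meditation': 3,
--     'honeymoon': 4, 'romantic': 4,
--     'beach': 5, 'island': 5,
--     'adventure': 6, 'trek': 6,
--     'buddhist': 7, 'circuit': 7,
--     'helicopter': 8, 'group': 9,
--     'international': 10, 'vietnam': 10, 'thailand': 10,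
-- }
--
-- THEMES = ['Pilgrimage', 'Heritage', 'Wildlife', 'Wellness', 'Romantic', 'Beach',
--           'Adventure', 'Spiritual', 'Helicopter Tours', 'Group Tours',
--           'International', 'General']
--
-- def classify_theme(text):
--     """Classify tour theme based on text"""
--     text_lower = text.lower()
--     best = len(THEMES) - 1  # rank of 'General'
--     for word, rank in KEYWORD_RANK.items():
--         if rank < best and word in text_lower:
--             best = rank
--     return THEMES[best]
-- ===== Notes on version B (the rewrite author's own statement) =====
-- stated objective: alternative
-- what changed: Replaces the ordered if/elif first-match cascade with an exhaustive scan over a flat keyword-to-rank map that maintains a running minimum theme rank, then indexes a theme list with that minimum.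
import Mathlib
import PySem

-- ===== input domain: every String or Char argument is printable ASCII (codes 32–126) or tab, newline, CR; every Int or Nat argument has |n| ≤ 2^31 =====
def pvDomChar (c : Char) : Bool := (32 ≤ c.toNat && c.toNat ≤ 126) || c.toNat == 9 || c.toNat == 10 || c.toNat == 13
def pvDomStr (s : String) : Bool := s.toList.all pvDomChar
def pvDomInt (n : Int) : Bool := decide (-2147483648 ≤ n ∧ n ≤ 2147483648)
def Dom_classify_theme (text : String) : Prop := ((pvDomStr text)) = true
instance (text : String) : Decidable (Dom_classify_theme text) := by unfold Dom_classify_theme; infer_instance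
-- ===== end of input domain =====

-- B replaces A's ordered if/elif cascade by an exhaustive scan over a flat keyword→rank map
-- keeping a running minimum theme rank (alternative decomposition, same cost).

-- ===== PORT A =====
def classify_theme (text : String) : String :=
  let text_lower := PySem.Str.lower text
  if ["pilgrim", "yatra", "dham", "temple"].any (fun word => PySem.Str.isIn word text_lower) then
    "Pilgrimage"
  else if ["heritage", "rajasthan", "palace"].any (fun word => PySem.Str.isIn word text_lower) then
    "Heritage"
  else if ["wildlife", "safari"].any (fun word => PySem.Str.isIn word text_lower) then
    "Wildlife"
  else if ["yoga", "meditation"].any (fun word => PySem.Str.isIn word text_lower) then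
    "Wellness"
  else if ["honeymoon", "romantic"].any (fun word => PySem.Str.isIn word text_lower) then
    "Romantic"
  else if ["beach", "island"].any (fun word => PySem.Str.isIn word text_lower) then
    "Beach"
  else if ["adventure", "trek"].any (fun word => PySem.Str.isIn word text_lower) then
    "Adventure"
  else if ["buddhist", "circuit"].any (fun word => PySem.Str.isIn word text_lower) then
    "Spiritual"
  else if ["helicopter"].any (fun word => PySem.Str.isIn word text_lower) then
    "Helicopter Tours"
  else if ["group"].any (fun word => PySem.Str.isIn word text_lower) then
    "Group Tours"
  else if ["international", "vietnam", "thailand"].any (fun word => PySem.Str.isIn word text_lower) then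
    "International"
  else
    "General"

-- ===== PORT B =====
-- KEYWORD_RANK dict in insertion order (all 24 keys distinct)
def keywordRank : List (String × Nat) :=
  [("pilgrim", 0), ("yatra", 0), ("dham", 0), ("temple", 0),
   ("heritage", 1), ("rajasthan", 1), ("palace", 1),
   ("wildlife", 2), ("safari", 2),
   ("yoga", 3), ("meditation", 3),
   ("honeymoon", 4), ("romantic", 4),
   ("beach", 5), ("island", 5),
   ("adventure", 6), ("trek", 6),
   ("buddhist", 7), ("circuit", 7),
   ("helicopter", 8), ("group", 9),
   ("international", 10), ("vietnam", 10), ("thailand", 10)]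

def themeList : List String :=
  ["Pilgrimage", "Heritage", "Wildlife", "Wellness", "Romantic", "Beach",
   "Adventure", "Spiritual", "Helicopter Tours", "Group Tours",
   "International", "General"]

def classify_theme_alt (text : String) : String :=
  let text_lower := PySem.Str.lower text
  -- best = len(THEMES) - 1; for word, rank in KEYWORD_RANK.items(): if rank < best and word in text_lower: best = rank
  let best := keywordRank.foldl
    (fun best wr => if wr.2 < best && PySem.Str.isIn wr.1 text_lower then wr.2 else best)
    (themeList.length - 1)
  themeList.getD best "General"   -- THEMES[best]; best < 12 always, so plain indexing is exact

-- ===== PRECONDITION & SPEC =====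
def Spec_classify_theme (text : String) (out : String) : Prop := out = classify_theme_alt text
instance (text : String) (out : String) : Decidable (Spec_classify_theme text out) := by unfold Spec_classify_theme; infer_instance

-- ===== CLAIM (what is proved, stated in full; the proofs are below) =====
def Claim_equal_classify_theme : Prop := ∀ (text : String), Dom_classify_theme text → Spec_classify_theme text (classify_theme text)

-- ===== LEMMAS AND PROOFS =====

-- folding a same-rank keyword group updates the running minimum iff the rank beats it and some keyword matches
lemma group_fold (tl : String) (r : Nat) (ws : List String) (acc : Nat) :
    (ws.map (fun w => (w, r))).foldl
      (fun best wr => if wr.2 < best && PySem.Str.isIn wr.1 tl then wr.2 else best) acc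
    = if r < acc && ws.any (fun w => PySem.Str.isIn w tl) then r else acc := by
  induction ws generalizing acc with
  | nil => simp
  | cons w ws ih =>
    simp only [List.map_cons, List.foldl_cons, List.any_cons, ih]
    by_cases hw : PySem.Chars.isIn w.toList tl.toList = true <;> by_cases hr : r < acc <;>
      simp [hw, hr]

lemma chain_eq_minfold (p0 p1 p2 p3 p4 p5 p6 p7 p8 p9 p10 : Bool) :
    (if p0 then "Pilgrimage"
     else if p1 then "Heritage"
     else if p2 then "Wildlife"
     else if p3 then "Wellness"
     else if p4 then "Romantic"
     else if p5 then "Beach"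
     else if p6 then "Adventure"
     else if p7 then "Spiritual"
     else if p8 then "Helicopter Tours"
     else if p9 then "Group Tours"
     else if p10 then "International"
     else "General")
    = themeList.getD ([(0, p0), (1, p1), (2, p2), (3, p3), (4, p4), (5, p5), (6, p6), (7, p7), (8, p8), (9, p9), (10, p10)].foldl
        (fun best pr => if pr.1 < best && pr.2 then pr.1 else best) 11) "General" := by
  cases p0 <;> cases p1 <;> cases p2 <;> cases p3 <;> cases p4 <;> cases p5 <;> cases p6 <;> cases p7 <;> cases p8 <;> cases p9 <;> cases p10 <;> rfl

-- folding the flattened grouped keyword list equals folding the per-group (rank, any-match) summaries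
lemma grouped_fold (tl : String) (groups : List (List String × Nat)) (acc : Nat) :
    (groups.flatMap (fun g => g.1.map (fun w => (w, g.2)))).foldl
      (fun best wr => if wr.2 < best && PySem.Str.isIn wr.1 tl then wr.2 else best) acc
  = (groups.map (fun g => (g.2, g.1.any (fun w => PySem.Str.isIn w tl)))).foldl
      (fun best pr => if pr.1 < best && pr.2 then pr.1 else best) acc := by
  induction groups generalizing acc with
  | nil => rfl
  | cons g gs ih =>
    simp only [List.flatMap_cons, List.map_cons, List.foldl_append, List.foldl_cons,
      group_fold, ih]

-- keywordRank as the flattening of rank groups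
lemma kw_split : keywordRank =
    ([(["pilgrim", "yatra", "dham", "temple"], 0),
      (["heritage", "rajasthan", "palace"], 1),
      (["wildlife", "safari"], 2),
      (["yoga", "meditation"], 3),
      (["honeymoon", "romantic"], 4),
      (["beach", "island"], 5),
      (["adventure", "trek"], 6),
      (["buddhist", "circuit"], 7),
      (["helicopter"], 8),
      (["group"], 9),
      (["international", "vietnam", "thailand"], 10)] : List (List String × Nat)).flatMap
      (fun g => g.1.map (fun w => (w, g.2))) := by rfl

-- ===== VERDICT (by name: the statement is the Claim_ definition above) =====
theorem classify_theme_spec : Claim_equal_classify_theme := by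
  intro text _
  unfold Spec_classify_theme
  simp only [classify_theme, classify_theme_alt]
  rw [show themeList.length - 1 = 11 from rfl, kw_split, grouped_fold]
  simp only [List.map_cons, List.map_nil]
  rw [chain_eq_minfold]
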